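-- pv_equiv track=rewrite | github.com/stocha74/kelimelik_strategic | dawg_helper.py | extract_word_parts
-- ===== SOURCE A (Python) =====
-- def extract_word_parts(board):
--     """
--     board: 15x15, hücreler '' veya 'A' gibi tek harf.
--     Dönen: list[(parca_str, (y,x), 'H'/'V')]
--     """
--     H, W = len(board), len(board[0])
--     parts = []
--
--     # --- Horizontal (H) ---
--     for y in range(H):
--         x = 0
--         while x < W:
--             if board[y][x] != '':
--                 x0 = x
--                 s = []
--                 while x < W and board[y][x] != '':
--                     s.append(board[y][x])
--                     x += 1
--                 parca = ''.join(s)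
--                 parts.append((parca, (y, x0), 'H'))
--             else:
--                 x += 1
--
--     # --- Vertical (V) ---
--     for x in range(W):
--         y = 0
--         while y < H:
--             if board[y][x] != '':
--                 y0 = y
--                 s = []
--                 while y < H and board[y][x] != '':
--                     s.append(board[y][x])
--                     y += 1
--                 parca = ''.join(s)
--                 parts.append((parca, (y0, x), 'V'))
--             else:
--                 y += 1
--
--     return parts
-- ===== SOURCE B (Python) =====
-- def _groups(row):
--     # maximal runs of cells sharing the same key (cell != '')
--     if not row:
--         return []
--     k = row[0] != ''
--     i = 1
--     while i < len(row) and (row[i] != '') == k: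
--         i += 1
--     return [(k, row[:i])] + _groups(row[i:])
--
--
-- def extract_word_parts(board):
--     W = len(board[0])
--     grid = [[row[x] for x in range(W)] for row in board]
--
--     def runs(g):
--         out = []
--         for r, row in enumerate(g):
--             c = 0
--             for k, cells in _groups(row):
--                 if k:
--                     out.append((''.join(cells), (r, c)))
--                 c += len(cells)
--         return out
--
--     parts = [(w, rc, 'H') for w, rc in runs(grid)]
--     parts += [(w, (c, r), 'V') for w, (r, c) in runs([list(col) for col in zip(*grid)])]
--     return parts
-- ===== Notes on version B (the rewrite author's own statement) =====
-- stated objective: alternative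
-- what changed: Replaces A's four nested index-walking while-loops (separate horizontal and vertical scanners) by one shared run extractor: a recursive grouping of each row into maximal empty/non-empty chunks folded with a column counter, applied to the grid and to its transpose (zip(*grid)) with coordinates swapped for the vertical parts.
import Mathlib
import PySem

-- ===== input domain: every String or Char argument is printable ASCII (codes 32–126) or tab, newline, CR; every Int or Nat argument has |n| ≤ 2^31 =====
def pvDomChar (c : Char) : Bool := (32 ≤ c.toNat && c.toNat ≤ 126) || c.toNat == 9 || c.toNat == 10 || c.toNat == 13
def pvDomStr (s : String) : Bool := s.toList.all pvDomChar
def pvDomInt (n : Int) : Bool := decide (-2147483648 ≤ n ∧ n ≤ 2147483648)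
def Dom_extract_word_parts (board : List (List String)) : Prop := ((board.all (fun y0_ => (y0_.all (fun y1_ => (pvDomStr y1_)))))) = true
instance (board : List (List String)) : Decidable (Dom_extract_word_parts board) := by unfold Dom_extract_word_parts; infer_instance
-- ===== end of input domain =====

-- B replaces A's four nested index-walking while-loops by one shared run extractor
-- (recursive chunking of a row into maximal empty/non-empty groups, folded with a
-- column counter) applied to the grid and to its transpose; objective: alternative.

-- ===== PORT A =====

-- inner while-loop of A: collect the maximal non-empty prefix, return it and the rest
def grabA : List String → List String × List String
  | [] => ([], [])
  | c :: rest =>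
    if c ≠ "" then
      ((c :: (grabA rest).1), (grabA rest).2)
    else ([], c :: rest)

theorem grabA_snd_len : ∀ l : List String, (grabA l).2.length ≤ l.length := by
  intro l
  induction l with
  | nil => simp [grabA]
  | cons c rest ih =>
    rw [grabA]
    split_ifs with hc
    · exact Nat.le_succ_of_le ih
    · simp

-- outer while-loop of A over one line (row or column): x is the running index
def scanA : List String → Nat → List (String × Nat)
  | [], _ => []
  | c :: rest, x =>
    if c ≠ "" then
      (String.join (grabA (c :: rest)).1, x)
        :: scanA (grabA (c :: rest)).2 (x + (grabA (c :: rest)).1.length)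
    else
      scanA rest (x + 1)
termination_by l _ => l.length
decreasing_by
  · have h := grabA_snd_len rest
    rw [grabA, if_pos (by assumption)]
    simp only [List.length_cons]
    omega
  · simp

def extract_word_parts (board : List (List String)) : List (String × (Int × Int) × String) :=
  let H := board.length
  let W := (board.headD []).length
  let hParts := (List.range H).foldl (fun acc y =>
    acc ++ (scanA ((board.getD y []).take W) 0).map
      (fun p => (p.1, ((y : Int), (p.2 : Int)), "H"))) []
  let vParts := (List.range W).foldl (fun acc x =>
    acc ++ (scanA ((List.range H).map (fun y => (board.getD y []).getD x "")) 0).map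
      (fun p => (p.1, ((p.2 : Int), (x : Int)), "V"))) []
  hParts ++ vParts

-- ===== PORT B =====

-- span of the leading cells whose key (cell != '') equals k (the while-loop in _groups)
def spanKeyB (k : Bool) : List String → List String × List String
  | [] => ([], [])
  | c :: rest =>
    if decide (c ≠ "") = k then
      ((c :: (spanKeyB k rest).1), (spanKeyB k rest).2)
    else ([], c :: rest)

theorem spanKeyB_snd_len (k : Bool) : ∀ l : List String, (spanKeyB k l).2.length ≤ l.length := by
  intro l
  induction l with
  | nil => simp [spanKeyB]
  | cons c rest ih =>
    rw [spanKeyB]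
    split_ifs with hc
    · exact Nat.le_succ_of_le ih
    · simp

-- _groups: maximal runs sharing the key (cell != '')
def chunksB : List String → List (Bool × List String)
  | [] => []
  | c :: rest =>
    (decide (c ≠ ""), c :: (spanKeyB (decide (c ≠ "")) rest).1)
      :: chunksB ((spanKeyB (decide (c ≠ "")) rest).2)
termination_by l => l.length
decreasing_by
  have h := spanKeyB_snd_len (decide (c ≠ "")) rest
  simp only [List.length_cons]
  omega

-- body of runs() for one enumerated row: fold the groups with the column counter c
def rowRunsB (r : Int) (row : List String) : List (String × Int × Int) :=
  ((chunksB row).foldl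
    (fun acc g =>
      (if g.1 then acc.1 ++ [(String.join g.2, (r, acc.2))] else acc.1,
       acc.2 + (g.2.length : Int)))
    (([] : List (String × Int × Int)), (0 : Int))).1

-- runs(): loop over enumerate(g) appending each row's runs
def runsB (g : List (List String)) : List (String × Int × Int) :=
  (PySem.List.enumerate g 0).foldl (fun out p => out ++ rowRunsB p.1 p.2) []

-- zip(*rows): heads while every list is non-empty
def zipStarB : List (List String) → List (List String)
  | [] => []
  | r0 :: rest =>
    if h : (r0 :: rest).all (fun r => r ≠ []) then
      ((r0 :: rest).map (fun r => r.headD ""))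
        :: zipStarB ((r0 :: rest).map (fun r => r.tail))
    else []
termination_by l => (l.headD []).length
decreasing_by
  simp only [List.all_cons, Bool.and_eq_true, decide_eq_true_eq] at h
  have h0 : 0 < r0.length := List.length_pos_of_ne_nil h.1
  simp only [List.map_cons, List.headD_cons, List.length_tail]
  omega

-- grid = [[row[x] for x in range(W)] for row in board]; row[x] is in range for
-- every input admitted by Pre_, so getD is exact there (Python raises outside Pre_).
def extract_word_parts_alt (board : List (List String)) : List (String × (Int × Int) × String) :=
  let W := (board.headD []).length
  let grid := board.map (fun row => (List.range W).map (fun x => row.getD x ""))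
  (runsB grid).map (fun p => (p.1, p.2, "H"))
    ++ (runsB (zipStarB grid)).map (fun p => (p.1, (p.2.2, p.2.1), "V"))

-- ===== PRECONDITION & SPEC =====
-- Pre_ excludes exactly the inputs on which A raises IndexError: the empty board
-- (board[0]) and ragged boards with a row shorter than the first row (board[y][x]);
-- B raises IndexError on those same inputs.
def Pre_extract_word_parts (board : List (List String)) : Prop :=
  board ≠ [] ∧ ∀ row ∈ board, (board.headD []).length ≤ row.length
instance (board : List (List String)) : Decidable (Pre_extract_word_parts board) := by
  unfold Pre_extract_word_parts; infer_instance

def pvWitness_extract_word_parts : List (List String) := [["A", ""], ["", "B"]]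

def Spec_extract_word_parts (board : List (List String)) (out : List (String × (Int × Int) × String)) : Prop := out = extract_word_parts_alt board
instance (board : List (List String)) (out : List (String × (Int × Int) × String)) : Decidable (Spec_extract_word_parts board out) := by unfold Spec_extract_word_parts; infer_instance

-- ===== CLAIM (what is proved, stated in full; the proofs are below) =====
def Claim_equal_extract_word_parts : Prop := ∀ (board : List (List String)), Dom_extract_word_parts board → Pre_extract_word_parts board → Spec_extract_word_parts board (extract_word_parts board)

-- ===== LEMMAS AND PROOFS =====

theorem grabA_eq_spanKeyB (l : List String) : grabA l = spanKeyB true l := by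
  induction l with
  | nil => simp [grabA, spanKeyB]
  | cons c rest ih =>
    rw [grabA, spanKeyB]
    by_cases hc : c = ""
    · rw [if_neg (by simp [hc]), if_neg (by simp [hc])]
    · rw [if_pos hc, if_pos (by simp [hc]), ih]

theorem spanKeyB_append (k : Bool) (l : List String) :
    (spanKeyB k l).1 ++ (spanKeyB k l).2 = l := by
  induction l with
  | nil => simp [spanKeyB]
  | cons c rest ih =>
    rw [spanKeyB]
    split_ifs with hc
    · simpa using ih
    · simp

theorem spanKeyB_fst_all (k : Bool) (l : List String) :
    ∀ a ∈ (spanKeyB k l).1, decide (a ≠ "") = k := by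
  induction l with
  | nil => simp [spanKeyB]
  | cons c rest ih =>
    rw [spanKeyB]
    split_ifs with hc
    · intro a ha
      simp only [List.mem_cons] at ha
      rcases ha with rfl | ha
      · exact hc
      · exact ih a ha
    · simp

theorem scanA_skip (g : List String) (rem : List String) (x : Nat)
    (hg : ∀ a ∈ g, a = "") : scanA (g ++ rem) x = scanA rem (x + g.length) := by
  induction g generalizing x with
  | nil => simp
  | cons c t ih =>
    have hc : c = "" := hg c (by simp)
    have h := ih (x + 1) (fun a ha => hg a (by simp [ha]))
    simp only [List.cons_append, scanA, hc]
    simp only [ne_eq, not_true_eq_false, if_false] at *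
    rw [h]
    congr 1
    simp
    omega

theorem rowRunsB_fold (r : Int) (row : List String) (x : Nat)
    (acc : List (String × Int × Int)) :
    (chunksB row).foldl
      (fun acc g =>
        (if g.1 then acc.1 ++ [(String.join g.2, (r, acc.2))] else acc.1,
         acc.2 + (g.2.length : Int)))
      (acc, (x : Int))
    = (acc ++ (scanA row x).map (fun p => (p.1, (r, (p.2 : Int)))),
       ((x + row.length : Nat) : Int)) := by
  induction row using chunksB.induct generalizing x acc with
  | case1 => simp [chunksB, scanA]
  | case2 c rest ih =>
    have happ := spanKeyB_append (decide (c ≠ "")) rest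
    have hsp := spanKeyB_snd_len (decide (c ≠ "")) rest
    have hlen : (spanKeyB (decide (c ≠ "")) rest).1.length
        + (spanKeyB (decide (c ≠ "")) rest).2.length = rest.length := by
      conv_rhs => rw [← happ]
      simp
    rw [chunksB, List.foldl_cons]
    by_cases hc : c = ""
    · have hk : decide (c ≠ "") = false := by simp [hc]
      rw [hk] at ih happ hlen ⊢
      have hcast : (x : Int) + (((false, c :: (spanKeyB false rest).1).2.length : Nat) : Int)
          = ((x + (1 + (spanKeyB false rest).1.length) : Nat) : Int) := by
        push_cast; simp; ring
      simp only [if_neg (by simp : ¬ (false = true))] at *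
      rw [hcast, ih]
      rw [Prod.mk.injEq]
      constructor
      · congr 1
        rw [scanA, if_neg (by simp [hc])]
        conv_rhs => rw [← happ]
        rw [scanA_skip _ _ _ (fun a ha => by
          have := spanKeyB_fst_all false rest a ha
          simpa using this)]
        have harith : x + (1 + (spanKeyB false rest).1.length)
            = x + 1 + (spanKeyB false rest).1.length := by omega
        rw [harith]
      · simp only [List.length_cons]
        push_cast
        omega
    · have hk : decide (c ≠ "") = true := by simp [hc]
      rw [hk] at ih happ hlen ⊢
      have hgrab : grabA (c :: rest) = (c :: (spanKeyB true rest).1, (spanKeyB true rest).2) := by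
        rw [grabA_eq_spanKeyB, spanKeyB, if_pos hk]
      have hcast : (x : Int) + (((true, c :: (spanKeyB true rest).1).2.length : Nat) : Int)
          = ((x + (1 + (spanKeyB true rest).1.length) : Nat) : Int) := by
        push_cast; simp; ring
      simp only [if_true]
      rw [hcast, ih]
      rw [Prod.mk.injEq]
      constructor
      · rw [scanA, if_pos (by simp [hc]), hgrab]
        simp only [List.map_cons, List.length_cons]
        rw [List.append_cons]
        have harith2 : x + (1 + (spanKeyB true rest).1.length)
            = x + ((spanKeyB true rest).1.length + 1) := by omega
        rw [harith2]
        simp [List.append_assoc]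
      · simp only [List.length_cons]
        push_cast
        omega

theorem rowRunsB_eq (r : Int) (row : List String) :
    rowRunsB r row = (scanA row 0).map (fun p => (p.1, (r, (p.2 : Int)))) := by
  have h := rowRunsB_fold r row 0 []
  simp only [Nat.cast_zero] at h
  simp [rowRunsB, h]

theorem foldl_append_flat {α β : Type} (l : List α) (f : α → List β) (init : List β) :
    l.foldl (fun out p => out ++ f p) init = init ++ l.flatMap f := by
  induction l generalizing init with
  | nil => simp
  | cons a t ih => simp [ih, List.flatMap_cons]

theorem enumerate_flat {β : Type} (l : List (List String)) (s : Int)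
    (f : Int → List String → List β) :
    (PySem.List.enumerate l s).flatMap (fun p => f p.1 p.2)
      = (List.range l.length).flatMap (fun y => f (s + (y : Nat)) (l.getD y [])) := by
  induction l generalizing s with
  | nil => simp [PySem.List.enumerate_nil]
  | cons a t ih =>
    rw [PySem.List.enumerate_cons]
    simp only [List.flatMap_cons, List.length_cons, List.range_succ_eq_map,
      List.flatMap_map]
    rw [ih (s + 1)]
    congr 1
    · simp
    · congr 1
      funext y
      simp only [Function.comp, List.getD_cons_succ]
      congr 1
      push_cast
      ring

theorem map_range_getD {β : Type} (l : List (List String)) (f : List String → β) :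
    l.map f = (List.range l.length).map (fun y => f (l.getD y [])) := by
  induction l with
  | nil => simp
  | cons a t ih =>
    simp only [List.map_cons, List.length_cons, List.range_succ_eq_map, List.map_map]
    rw [ih]
    simp [Function.comp]

theorem zipStarB_eq (W : Nat) (rows : List (List String)) (hne : rows ≠ [])
    (hlen : ∀ r ∈ rows, r.length = W) :
    zipStarB rows = (List.range W).map (fun x => rows.map (fun r => r.getD x "")) := by
  induction W generalizing rows with
  | zero =>
    cases rows with
    | nil => exact absurd rfl hne
    | cons r t =>
      have hr : r = [] := List.eq_nil_of_length_eq_zero (hlen r (by simp))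
      rw [zipStarB, dif_neg (by simp [hr])]
      simp
  | succ W ih =>
    cases rows with
    | nil => exact absurd rfl hne
    | cons r t =>
      have hall : ((r :: t).all (fun x => x ≠ [])) = true := by
        simp only [List.all_eq_true]
        intro a ha
        have := hlen a ha
        simp only [decide_eq_true_eq]
        intro h0
        rw [h0] at this
        simp at this
      have htl : ∀ a ∈ (r :: t).map (fun r => r.tail), a.length = W := by
        intro a ha
        simp only [List.mem_map] at ha
        obtain ⟨b, hb, rfl⟩ := ha
        have := hlen b hb
        simp [List.length_tail, this]
      rw [zipStarB, dif_pos hall,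
        ih ((r :: t).map (fun r => r.tail)) (by simp) htl]
      rw [List.range_succ_eq_map]
      simp only [List.map_cons, List.map_map]
      have hhead : ∀ a ∈ r :: t, a.headD "" = a.getD 0 "" := by
        intro a ha
        have hne' := List.all_eq_true.mp hall a ha
        cases a with
        | nil => simp at hne'
        | cons b bt => simp
      have htail : ∀ (x : Nat) (a : List String), a.tail.getD x "" = a.getD (x + 1) "" := by
        intro x a
        cases a <;> simp
      congr 1
      · simpa using List.map_congr_left hhead
      · apply List.map_congr_left
        intro x _
        simp only [Function.comp]
        congr 1
        · simpa [Nat.succ_eq_add_one] using htail x r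
        · apply List.map_congr_left
          intro a _
          simpa [Nat.succ_eq_add_one, Function.comp] using htail x a

theorem flatMap_congr_mem {α β : Type} (l : List α) {f g : α → List β}
    (h : ∀ a ∈ l, f a = g a) : l.flatMap f = l.flatMap g := by
  induction l with
  | nil => simp
  | cons a t ih =>
    simp only [List.flatMap_cons]
    rw [h a (by simp), ih (fun b hb => h b (by simp [hb]))]

theorem getD_map_lt {α β : Type} (l : List α) (f : α → β) (y : Nat) (d : α) (d' : β)
    (h : y < l.length) : (l.map f).getD y d' = f (l.getD y d) := by
  simp [List.getD, List.getElem?_map, List.getElem?_eq_getElem h]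

theorem getD_take_lt (l : List String) (x W : Nat) (h : x < W) :
    (l.take W).getD x "" = l.getD x "" := by
  simp [List.getD, List.getElem?_take_of_lt h]

theorem range_getD (n y : Nat) (h : y < n) : (List.range n).getD y 0 = y := by
  simp [List.getD, List.getElem?_range h]

theorem runsB_eq (g : List (List String)) :
    runsB g = (List.range g.length).flatMap
      (fun y => (scanA (g.getD y []) 0).map
        (fun p => (p.1, ((y : Nat) : Int), (p.2 : Int)))) := by
  rw [runsB, foldl_append_flat, List.nil_append,
    enumerate_flat g 0 (fun r row => rowRunsB r row)]
  apply flatMap_congr_mem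
  intro y _
  rw [rowRunsB_eq]
  simp

-- under Pre_, [row[x] for x in range(W)] is exactly row.take W
theorem range_map_getD_eq_take (row : List String) (W : Nat) (h : W ≤ row.length) :
    (List.range W).map (fun x => row.getD x "") = row.take W := by
  apply List.ext_getElem
  · simp [Nat.min_eq_left h]
  · intro i h1 h2
    simp only [List.getElem_map, List.getElem_range, List.getElem_take]
    simp only [List.length_map, List.length_range] at h1
    simp [List.getD, List.getElem?_eq_getElem (Nat.lt_of_lt_of_le h1 h)]

-- ===== VERDICT (by name: the statement is the Claim_ definition above) =====
theorem extract_word_parts_spec : Claim_equal_extract_word_parts := by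
  intro board _ hpre
  obtain ⟨hne, hwide⟩ := hpre
  unfold Spec_extract_word_parts extract_word_parts extract_word_parts_alt
  simp only []
  have hgrid : board.map (fun row => (List.range (board.headD []).length).map
        (fun x => row.getD x ""))
      = board.map (fun row => row.take (board.headD []).length) :=
    List.map_congr_left (fun row hrow =>
      range_map_getD_eq_take row _ (hwide row hrow))
  rw [hgrid]
  rw [foldl_append_flat, foldl_append_flat, List.nil_append, List.nil_append]
  have hgridlen : (board.map (fun row => row.take (board.headD []).length)).length
      = board.length := by simp
  have hgridne : board.map (fun row => row.take (board.headD []).length) ≠ [] := by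
    simp [hne]
  have hgridw : ∀ g ∈ board.map (fun row => row.take (board.headD []).length),
      g.length = (board.headD []).length := by
    intro g hg
    simp only [List.mem_map] at hg
    obtain ⟨row, hrow, rfl⟩ := hg
    simp only [List.length_take]
    exact Nat.min_eq_left (hwide row hrow)
  congr 1
  · -- horizontal parts
    rw [runsB_eq, List.map_flatMap, hgridlen]
    apply flatMap_congr_mem
    intro y hy
    rw [List.mem_range] at hy
    rw [getD_map_lt board _ y [] [] hy, List.map_map]
    simp [Function.comp]
  · -- vertical parts
    rw [runsB_eq, List.map_flatMap,
      zipStarB_eq (board.headD []).length _ hgridne hgridw]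
    simp only [List.length_map, List.length_range]
    apply flatMap_congr_mem
    intro x hx
    rw [List.mem_range] at hx
    rw [getD_map_lt (List.range (board.headD []).length) _ x 0 [] (by simpa using hx),
      range_getD _ _ hx, List.map_map]
    simp only [Function.comp_def]
    have hcol : (board.map (fun row => row.take (board.headD []).length)).map
          (fun r => r.getD x "")
        = (List.range board.length).map
          (fun y => (board.getD y []).getD x "") := by
      simp only [List.map_map, Function.comp_def]
      rw [map_range_getD board (fun row => (row.take (board.headD []).length).getD x "")]
      apply List.map_congr_left
      intro y _
      exact getD_take_lt _ _ _ hx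
    rw [hcol]
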